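-- pv_equiv track=rewrite | github.com/zhongzee/GraSecon | codet/modeling/debug.py | _ind2il
-- ===== SOURCE A (Python) =====
-- def _ind2il(ind, shapes_per_level, N):
--     r = ind
--     l = 0
--     S = 0
--     while r - S >= N * shapes_per_level[l][0] * shapes_per_level[l][1]:
--         S += N * shapes_per_level[l][0] * shapes_per_level[l][1]
--         l += 1
--     i = (r - S) // (shapes_per_level[l][0] * shapes_per_level[l][1])
--     return i, l
-- ===== SOURCE B (Python) =====
-- def _ind2il(ind, shapes_per_level, N):
--     # phase 1: cumulative totals of per-level sizes
--     cum = []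
--     total = 0
--     for h, w in shapes_per_level:
--         total += N * h * w
--         cum.append(total)
--     # phase 2: first level whose cumulative total exceeds ind
--     l = next(j for j, c in enumerate(cum) if ind < c)
--     prev = cum[l - 1] if l > 0 else 0
--     h, w = shapes_per_level[l]
--     return (ind - prev) // (h * w), l
-- ===== Notes on version B (the rewrite author's own statement) =====
-- stated objective: alternative
-- what changed: B replaces A's fused accumulate-and-compare while loop (running offset S, repeated size recomputation) by two phases: precompute the cumulative per-level size list, then search it for the first entry exceeding ind and read the prefix offset back from the list.
import Mathlib
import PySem

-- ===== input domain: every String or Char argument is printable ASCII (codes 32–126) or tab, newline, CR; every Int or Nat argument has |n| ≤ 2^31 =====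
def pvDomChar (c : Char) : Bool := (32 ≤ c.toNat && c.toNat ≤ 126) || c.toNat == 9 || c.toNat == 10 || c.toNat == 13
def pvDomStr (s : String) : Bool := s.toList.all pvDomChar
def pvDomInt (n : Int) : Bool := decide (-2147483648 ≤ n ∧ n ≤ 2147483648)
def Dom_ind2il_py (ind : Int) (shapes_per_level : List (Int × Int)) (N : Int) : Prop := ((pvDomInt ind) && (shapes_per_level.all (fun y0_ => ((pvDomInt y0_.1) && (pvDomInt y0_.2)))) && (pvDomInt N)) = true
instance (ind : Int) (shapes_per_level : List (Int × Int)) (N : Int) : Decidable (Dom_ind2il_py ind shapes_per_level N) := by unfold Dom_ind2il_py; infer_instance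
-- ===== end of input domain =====

-- B splits A's fused accumulate-and-compare loop into two phases: precompute the cumulative size list, then find the first entry exceeding ind (alternative decomposition, not claimed faster).

-- ===== PORT A =====
-- A's while loop: walk the levels, accumulating S and counting l; empty tail = Python IndexError (outside Pre_).
def ind2il_pyGo (ind N : Int) : List (Int × Int) → Int → Int → Int × Int
  | [], _, _ => (0, 0)  -- shapes_per_level[l] raises IndexError here; unreachable under Pre_
  | (h, w) :: rest, S, l =>
    if ind - S ≥ N * h * w then
      ind2il_pyGo ind N rest (S + N * h * w) (l + 1)
    else
      (PySem.Int.floordiv (ind - S) (h * w), l)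

def ind2il_py (ind : Int) (shapes_per_level : List (Int × Int)) (N : Int) : Int × Int :=
  ind2il_pyGo ind N shapes_per_level 0 0

-- ===== PORT B =====
-- first pass of Source B: the running cumulative totals of per-level sizes N*h*w.
def ind2il_altCum (N : Int) : List (Int × Int) → Int → List Int
  | [], _ => []
  | (h, w) :: rest, total => (total + N * h * w) :: ind2il_altCum N rest (total + N * h * w)

-- Source B's 'next(j for j, c in enumerate(cum) if ind < c)': first index whose entry exceeds ind (none = StopIteration).
def ind2il_altFind (ind : Int) : List Int → Nat → Option Nat
  | [], _ => none
  | c :: rest, j => if ind < c then some j else ind2il_altFind ind rest (j + 1)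

def ind2il_py_alt (ind : Int) (shapes_per_level : List (Int × Int)) (N : Int) : Int × Int :=
  let cum := ind2il_altCum N shapes_per_level 0
  match ind2il_altFind ind cum 0 with
  | none => (0, 0)  -- next(...) raises StopIteration here; unreachable under Pre_
  | some l =>
    let prev := if 0 < l then cum.getD (l - 1) 0 else 0
    match shapes_per_level[l]? with
    | none => (0, 0)  -- unreachable: l < cum.length = shapes_per_level.length
    | some (h, w) => (PySem.Int.floordiv (ind - prev) (h * w), (l : Int))

-- ===== PRECONDITION & SPEC =====
-- sum of the sizes N*h*w of the first k levels (used to state Pre_ and the lemmas)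
def pvPsum (N : Int) (sh : List (Int × Int)) (k : Nat) : Int :=
  ((sh.take k).map (fun p => N * p.1 * p.2)).sum

-- Pre_ is exactly the domain on which A returns: some level l is the first whose cumulative size
-- exceeds ind (otherwise the scan runs off the list: IndexError) and that level has nonzero area
-- h*w (otherwise ZeroDivisionError).
def Pre_ind2il_py (ind : Int) (shapes_per_level : List (Int × Int)) (N : Int) : Prop :=
  ∃ l ∈ List.range shapes_per_level.length,
    (∀ k ∈ List.range l, pvPsum N shapes_per_level (k + 1) ≤ ind) ∧
    ind < pvPsum N shapes_per_level (l + 1) ∧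
    (shapes_per_level.getD l (0, 0)).1 * (shapes_per_level.getD l (0, 0)).2 ≠ 0
instance (ind : Int) (shapes_per_level : List (Int × Int)) (N : Int) : Decidable (Pre_ind2il_py ind shapes_per_level N) := by unfold Pre_ind2il_py; infer_instance

def pvWitness_ind2il_py : Int × (List (Int × Int)) × Int := (5, [(2, 2), (3, 3)], 1)

def Spec_ind2il_py (ind : Int) (shapes_per_level : List (Int × Int)) (N : Int) (out : Int × Int) : Prop := out = ind2il_py_alt ind shapes_per_level N
instance (ind : Int) (shapes_per_level : List (Int × Int)) (N : Int) (out : Int × Int) : Decidable (Spec_ind2il_py ind shapes_per_level N out) := by unfold Spec_ind2il_py; infer_instance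

-- ===== CLAIM (what is proved, stated in full; the proofs are below) =====
def Claim_equal_ind2il_py : Prop := ∀ (ind : Int) (shapes_per_level : List (Int × Int)) (N : Int), Dom_ind2il_py ind shapes_per_level N → Pre_ind2il_py ind shapes_per_level N → Spec_ind2il_py ind shapes_per_level N (ind2il_py ind shapes_per_level N)

-- ===== LEMMAS AND PROOFS =====

theorem pvPsum_zero (N : Int) (sh : List (Int × Int)) : pvPsum N sh 0 = 0 := by
  simp [pvPsum]

theorem pvPsum_cons_succ (N h w : Int) (rest : List (Int × Int)) (k : Nat) :
    pvPsum N ((h, w) :: rest) (k + 1) = N * h * w + pvPsum N rest k := by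
  simp [pvPsum]

theorem pvCum_length (N : Int) (sh : List (Int × Int)) (t : Int) :
    (ind2il_altCum N sh t).length = sh.length := by
  induction sh generalizing t with
  | nil => simp [ind2il_altCum]
  | cons p rest ih => simp [ind2il_altCum, ih]

theorem pvCum_getD (N : Int) (sh : List (Int × Int)) (t : Int) (k : Nat) (hk : k < sh.length) :
    (ind2il_altCum N sh t).getD k 0 = t + pvPsum N sh (k + 1) := by
  induction sh generalizing t k with
  | nil => simp at hk
  | cons p rest ih =>
    obtain ⟨h, w⟩ := p
    cases k with
    | zero => simp [ind2il_altCum, pvPsum_cons_succ, pvPsum_zero]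
    | succ k =>
      simp only [ind2il_altCum, List.getD_cons_succ, pvPsum_cons_succ]
      rw [ih _ k (by simpa using hk)]
      ring

-- first-crossing search: if L is the first index whose entry exceeds ind, the scan returns j + L
theorem pvFind_eq (ind : Int) :
    ∀ (cum : List Int) (j L : Nat), L < cum.length →
      (∀ k : Nat, k < L → cum.getD k 0 ≤ ind) → ind < cum.getD L 0 →
      ind2il_altFind ind cum j = some (j + L) := by
  intro cum
  induction cum with
  | nil => intro _ L hL; simp at hL
  | cons c rest ih =>
    intro j L hL hlow hupp
    cases L with
    | zero =>
      simp only [List.getD_cons_zero] at hupp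
      rw [ind2il_altFind, if_pos hupp]
      simp
    | succ L =>
      have h0 : c ≤ ind := by simpa using hlow 0 (by omega)
      rw [ind2il_altFind, if_neg (by omega)]
      rw [ih (j + 1) L (by simpa using hL)
        (fun k hk => by simpa using hlow (k + 1) (by omega)) (by simpa using hupp)]
      congr 1
      omega

-- characterisation of A's loop: if L is the first level whose cumulative total exceeds ind - S, A stops there
theorem pvGoA_char (ind N : Int) :
    ∀ (sh : List (Int × Int)) (S l : Int) (L : Nat) (hL : L < sh.length),
      (∀ k : Nat, k < L → S + pvPsum N sh (k + 1) ≤ ind) →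
      ind < S + pvPsum N sh (L + 1) →
      ind2il_pyGo ind N sh S l =
        (PySem.Int.floordiv (ind - (S + pvPsum N sh L)) (sh[L].1 * sh[L].2), l + (L : Int)) := by
  intro sh
  induction sh with
  | nil => intro _ _ L hL; simp at hL
  | cons p rest ih =>
    intro S l L hL hlow hupp
    obtain ⟨h, w⟩ := p
    cases L with
    | zero =>
      rw [pvPsum_cons_succ, pvPsum_zero] at hupp
      simp only [pvPsum_zero] at hupp ⊢
      rw [ind2il_pyGo, if_neg (by omega)]
      simp
    | succ L =>
      have h0 : S + N * h * w ≤ ind := by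
        have := hlow 0 (by omega)
        rwa [pvPsum_cons_succ, pvPsum_zero, add_zero] at this
      rw [ind2il_pyGo, if_pos (by omega)]
      rw [ih (S + N * h * w) (l + 1) L (by simpa using hL)
        (fun k hk => by have := hlow (k + 1) (by omega); rw [pvPsum_cons_succ] at this; omega)
        (by rw [pvPsum_cons_succ] at hupp; omega)]
      rw [pvPsum_cons_succ]
      simp only [List.getElem_cons_succ, Prod.mk.injEq]
      refine ⟨by ring_nf, by push_cast; ring⟩

-- ===== VERDICT (by name: the statement is the Claim_ definition above) =====
theorem ind2il_py_spec : Claim_equal_ind2il_py := by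
  intro ind sh N _ hpre
  obtain ⟨L, hLmem, hlow, hupp, -⟩ := hpre
  have hL : L < sh.length := List.mem_range.mp hLmem
  have hlow' : ∀ k : Nat, k < L → (0 : Int) + pvPsum N sh (k + 1) ≤ ind := by
    intro k hk
    have := hlow k (List.mem_range.mpr hk)
    omega
  have hupp' : ind < (0 : Int) + pvPsum N sh (L + 1) := by omega
  have hA := pvGoA_char ind N sh 0 0 L hL hlow' hupp'
  show ind2il_py ind sh N = ind2il_py_alt ind sh N
  rw [ind2il_py, hA]
  rw [ind2il_py_alt]
  set cum := ind2il_altCum N sh 0 with hcum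
  have hcl : cum.length = sh.length := pvCum_length N sh 0
  have hfind : ind2il_altFind ind cum 0 = some L := by
    have := pvFind_eq ind cum 0 L (by omega)
      (fun k hk => by
        rw [hcum, pvCum_getD N sh 0 k (by omega)]
        have := hlow' k hk
        omega)
      (by rw [hcum, pvCum_getD N sh 0 L (by omega)]; omega)
    simpa using this
  rw [hfind]
  simp only
  rw [List.getElem?_eq_getElem hL]
  have hprev : (if 0 < L then cum.getD (L - 1) 0 else 0) = pvPsum N sh L := by
    by_cases h0 : 0 < L
    · rw [if_pos h0, hcum, pvCum_getD N sh 0 (L - 1) (by omega)]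
      have : L - 1 + 1 = L := by omega
      rw [this]; ring
    · rw [if_neg h0]
      have : L = 0 := by omega
      rw [this, pvPsum_zero]
  rw [hprev]
  simp
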